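-- pv_equiv track=rewrite | github.com/ItZoopark/11b_23_ege | main.py | f_3717
-- ===== SOURCE A (Python) =====
-- def zero(a):
--     size = len(bin(a)[3:])
--     return 2 ** size
--
-- def isZero(a):
--     x = bin(a)[2:]
--     if x[0] == '1' and sum(map(int, list(x[1:]))) == 0:
--         return True
--     else:
--         return False
--
-- def f_3717(x, y):
--     if x == y:
--         return 1
--     elif x < y:
--         return 0
--     else:
--         if isZero(x):
--             return f_3717(x - 1, y)
--         else:
--             return f_3717(zero(x), y) + f_3717(x - 1, y)
-- ===== SOURCE B (Python) =====
-- def msb_pow(n):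
--     # largest power of two <= n (n >= 1)
--     p = 1
--     while 2 * p <= n:
--         p *= 2
--     return p
--
-- def f_3717(x, y):
--     # bottom-up DP over the values y..x instead of A's branching recursion
--     if x < y:
--         return 0
--     g = {y: 1}
--     for n in range(y + 1, x + 1):
--         v = g.get(n - 1, 0)
--         if n >= 1:
--             p = msb_pow(n)
--             if p != n:
--                 v += g.get(p, 0)
--         g[n] = v
--     return g[x]
-- ===== Notes on version B (the rewrite author's own statement) =====
-- stated objective: alternative
-- what changed: Replaces A's unmemoized branching recursion f(x)=f(msb(x))+f(x-1) by a bottom-up dynamic program that fills a table of the values for n = y..x in one pass, each entry computed from the two already-stored entries n-1 and msb(n).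
import Mathlib
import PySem

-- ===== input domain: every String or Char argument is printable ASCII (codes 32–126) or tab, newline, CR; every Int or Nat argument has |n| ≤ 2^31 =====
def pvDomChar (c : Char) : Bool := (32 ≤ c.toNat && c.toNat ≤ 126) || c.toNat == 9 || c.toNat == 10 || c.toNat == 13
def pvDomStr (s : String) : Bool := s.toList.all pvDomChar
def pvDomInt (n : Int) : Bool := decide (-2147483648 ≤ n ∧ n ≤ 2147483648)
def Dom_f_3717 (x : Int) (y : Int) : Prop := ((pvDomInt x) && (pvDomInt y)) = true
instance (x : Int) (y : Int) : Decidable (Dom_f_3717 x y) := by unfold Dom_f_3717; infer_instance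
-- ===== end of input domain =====

-- B replaces A's unmemoized branching recursion by a one-pass bottom-up DP over the values y..x (objective: alternative).

-- ===== PORT A =====

-- int(c) for a single digit character; exact on '0'..'9' (it is only compared on binary digits)
def pyIntOfDigitChar (c : Char) : Int := (c.toNat : Int) - 48

-- zero(a): size = len(bin(a)[3:]); return 2 ** size
def zeroA (a : Int) : Int :=
  let size := ((PySem.Int.toBinChars0b a).drop 3).length
  (2 : Int) ^ size

-- isZero(a): x = bin(a)[2:]; x[0] == '1' and sum(map(int, list(x[1:]))) == 0
-- (bin(a)[2:] is never empty, so the [] branch is unreachable; kept only for totality)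
def isZeroA (a : Int) : Bool :=
  match (PySem.Int.toBinChars0b a).drop 2 with
  | [] => false
  | c :: rest => c == '1' && ((rest.map pyIntOfDigitChar).sum == 0)

-- the recursion of f_3717, with a fuel guard that only makes it total: on Pre_ every
-- recursive call strictly decreases (x - y).toNat, so the fuel below is never exhausted
def fA : Nat → Int → Int → Int
  | 0, _, _ => 0
  | fuel+1, x, y =>
    if x = y then 1
    else if x < y then 0
    else if isZeroA x then fA fuel (x - 1) y
    else fA fuel (zeroA x) y + fA fuel (x - 1) y

def f_3717 (x : Int) (y : Int) : Int := fA ((x - y).toNat + 1) x y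

-- ===== PORT B =====

-- largest power of two <= n (for n >= 1); while loop ported with fuel n.toNat, which is
-- never exhausted since p doubles from 1
def msbLoop (n : Int) : Nat → Int → Int
  | 0, p => p
  | fuel+1, p => if 2 * p ≤ n then msbLoop n fuel (2 * p) else p

def msb_pow (n : Int) : Int := msbLoop n n.toNat 1

-- one iteration of B's DP loop body
def stepB (g : PySem.Dict Int Int) (n : Int) : PySem.Dict Int Int :=
  let v := g.getD (n - 1) 0
  let v' := if 1 ≤ n then
              (let p := msb_pow n
               if p ≠ n then v + g.getD p 0 else v)
            else v
  g.insert n v'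

def f_3717_alt (x : Int) (y : Int) : Int :=
  if x < y then 0
  else
    let g := (PySem.List.pyRange (y + 1) (x + 1) 1).foldl stepB ((PySem.Dict.empty).insert y 1)
    g.getD x 0   -- g[x]; the key is always present here since y ≤ x

-- ===== PRECONDITION & SPEC =====
-- Pre_ excludes exactly the inputs with y < 0 < x - y, on which A's recursion never
-- bottoms out (it cycles through 0 and 1) and raises RecursionError; A returns on all others.
def Pre_f_3717 (x : Int) (y : Int) : Prop := x ≤ y ∨ 0 ≤ y
instance (x : Int) (y : Int) : Decidable (Pre_f_3717 x y) := by unfold Pre_f_3717; infer_instance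

def pvWitness_f_3717 : Int × Int := (10, 2)

def Spec_f_3717 (x : Int) (y : Int) (out : Int) : Prop := out = f_3717_alt x y
instance (x : Int) (y : Int) (out : Int) : Decidable (Spec_f_3717 x y out) := by unfold Spec_f_3717; infer_instance

-- ===== CLAIM (what is proved, stated in full; the proofs are below) =====
def Claim_equal_f_3717 : Prop := ∀ (x : Int) (y : Int), Dom_f_3717 x y → Pre_f_3717 x y → Spec_f_3717 x y (f_3717 x y)

-- ===== LEMMAS AND PROOFS =====

-- digit sum of a character list, as computed by isZeroA
def dsum (l : List Char) : Int := (l.map pyIntOfDigitChar).sum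

-- the value F(n) the recursion computes, with its canonical sufficient fuel
def Fv (n y : Int) : Int := fA ((n - y).toNat + 1) n y

lemma bits_fact : ∀ m : Nat, 1 ≤ m →
    ∃ rest, Nat.toDigits 2 m = '1' :: rest ∧ 0 ≤ dsum rest ∧
      (dsum rest = 0 ↔ ∃ k : Nat, m = 2 ^ k) := by
  intro m
  induction m using Nat.strong_induction_on with
  | _ m ih =>
    intro hm
    by_cases h2 : m < 2
    · have : m = 1 := by omega
      subst this
      refine ⟨[], by rw [Nat.toDigits_of_lt_base (by norm_num)]; rfl, by simp [dsum], ?_⟩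
      simp [dsum]
      exact ⟨0, rfl⟩
    · have hrec := Nat.toDigits_eq_if (b := 2) (n := m) (by norm_num)
      rw [if_neg h2] at hrec
      obtain ⟨r, hr, hpos, hiff⟩ := ih (m / 2) (by omega) (by omega)
      refine ⟨r ++ [(m % 2).digitChar], by rw [hrec, hr]; rfl, ?_, ?_⟩
      · have hd : pyIntOfDigitChar (m % 2).digitChar = ((m % 2 : Nat) : Int) := by
          have : m % 2 = 0 ∨ m % 2 = 1 := by omega
          rcases this with h | h <;> rw [h] <;> simp [pyIntOfDigitChar, Nat.digitChar]
        have : dsum (r ++ [(m % 2).digitChar]) = dsum r + ((m % 2 : Nat) : Int) := by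
          simp [dsum, hd]
        rw [this]; omega
      · have hd : pyIntOfDigitChar (m % 2).digitChar = ((m % 2 : Nat) : Int) := by
          have : m % 2 = 0 ∨ m % 2 = 1 := by omega
          rcases this with h | h <;> rw [h] <;> simp [pyIntOfDigitChar, Nat.digitChar]
        have hds : dsum (r ++ [(m % 2).digitChar]) = dsum r + ((m % 2 : Nat) : Int) := by
          simp [dsum, hd]
        rw [hds]
        constructor
        · intro h0
          have h1 : dsum r = 0 := by omega
          have h3 : m % 2 = 0 := by omega
          obtain ⟨k, hk⟩ := hiff.mp h1
          exact ⟨k + 1, by rw [pow_succ]; omega⟩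
        · rintro ⟨k, hk⟩
          have hk1 : 1 ≤ k := by
            rcases Nat.eq_zero_or_pos k with h | h
            · subst h; omega
            · exact h
          obtain ⟨k', rfl⟩ : ∃ k', k = k' + 1 := ⟨k - 1, by omega⟩
          rw [pow_succ] at hk
          have hm2 : m / 2 = 2 ^ k' ∧ m % 2 = 0 := by
            constructor <;> omega
          have := hiff.mpr ⟨k', hm2.1⟩
          omega


lemma lenBounds (m : Nat) (hm : 1 ≤ m) :
    2 ^ ((Nat.toDigits 2 m).length - 1) ≤ m ∧ m < 2 ^ (Nat.toDigits 2 m).length := by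
  have hpos : 0 < (Nat.toDigits 2 m).length := Nat.length_toDigits_pos
  constructor
  · rcases Nat.lt_or_ge 1 (Nat.toDigits 2 m).length with h | h
    · by_contra hc
      push_neg at hc
      have := (Nat.length_toDigits_le_iff (b := 2) (n := m) (k := (Nat.toDigits 2 m).length - 1)
        (by norm_num) (by omega)).mpr hc
      omega
    · have : (Nat.toDigits 2 m).length = 1 := by omega
      rw [this]; simpa using hm
  · exact (Nat.length_toDigits_le_iff (by norm_num) hpos).mp le_rfl

lemma toBinChars0b_nonneg (a : Int) (h : 0 ≤ a) :
    PySem.Int.toBinChars0b a = '0' :: 'b' :: Nat.toDigits 2 a.toNat := by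
  simp [PySem.Int.toBinChars0b, not_lt.mpr h]

lemma zeroA_eq (a : Int) (h : 0 ≤ a) :
    zeroA a = (2 : Int) ^ ((Nat.toDigits 2 a.toNat).length - 1) := by
  simp [zeroA, toBinChars0b_nonneg a h]

lemma isZeroA_iff (n : Int) (h : 1 ≤ n) :
    isZeroA n = true ↔ ∃ k : Nat, n = (2 : Int) ^ k := by
  have hm : 1 ≤ n.toNat := by omega
  have hcast : n = (n.toNat : Int) := by omega
  obtain ⟨rest, hr, hpos, hiff⟩ := bits_fact n.toNat hm
  have hdrop : (PySem.Int.toBinChars0b ((n.toNat : Int))).drop 2 = '1' :: rest := by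
    rw [toBinChars0b_nonneg _ (by positivity), show ((n.toNat : Int)).toNat = n.toNat from by omega, hr]
    simp
  have hiz : isZeroA n = (('1' == '1') && ((rest.map pyIntOfDigitChar).sum == 0)) := by
    rw [hcast]
    unfold isZeroA
    rw [hdrop]
  rw [hiz]
  simp only [beq_self_eq_true, Bool.true_and, beq_iff_eq]
  rw [show (rest.map pyIntOfDigitChar).sum = dsum rest from rfl, hiff]
  constructor
  · rintro ⟨k, hk⟩
    refine ⟨k, ?_⟩
    rw [hcast, hk]
    push_cast
    ring
  · rintro ⟨k, hk⟩
    refine ⟨k, ?_⟩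
    have h2 : n = ((2^k : Nat) : Int) := by rw [hk]; push_cast; ring
    clear hiff hk
    omega

lemma zeroA_spec (n : Int) (h : 1 ≤ n) :
    (∃ e : Nat, zeroA n = (2 : Int) ^ e) ∧ zeroA n ≤ n ∧ n < 2 * zeroA n := by
  have hm : 1 ≤ n.toNat := by omega
  obtain ⟨hlo, hhi⟩ := lenBounds n.toNat hm
  have hL : 0 < (Nat.toDigits 2 n.toNat).length := Nat.length_toDigits_pos
  obtain ⟨t, ht⟩ : ∃ t, (Nat.toDigits 2 n.toNat).length = t + 1 := ⟨(Nat.toDigits 2 n.toNat).length - 1, by omega⟩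
  have hz := zeroA_eq n (by omega)
  rw [ht] at hlo hhi hz
  simp only [Nat.add_sub_cancel] at hlo hz
  have hloI : (2:Int)^t ≤ n := by
    calc (2:Int)^t = ((2^t : Nat) : Int) := by push_cast; ring
    _ ≤ (n.toNat : Int) := by exact_mod_cast hlo
    _ ≤ n := by omega
  have hhiI : n < 2 * (2:Int)^t := by
    have h1 : (n.toNat : Int) < ((2^(t+1) : Nat) : Int) := by exact_mod_cast hhi
    have h2 : ((2^(t+1) : Nat) : Int) = 2 * (2:Int)^t := by push_cast; ring
    omega
  exact ⟨⟨t, hz⟩, by omega, by omega⟩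

lemma msbLoop_spec : ∀ (fuel : Nat) (n p : Int), 0 < p → p ≤ n → n < p * 2 ^ fuel →
    msbLoop n fuel p ≤ n ∧ n < 2 * msbLoop n fuel p ∧ ∃ e : Nat, msbLoop n fuel p = p * 2 ^ e := by
  intro fuel
  induction fuel with
  | zero =>
    intro n p hp hpn hlt
    rw [pow_zero, mul_one] at hlt
    omega
  | succ fuel ih =>
    intro n p hp hpn hlt
    have hunf : msbLoop n (fuel+1) p = (if 2 * p ≤ n then msbLoop n fuel (2 * p) else p) := rfl
    rw [hunf]
    by_cases h : 2 * p ≤ n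
    · rw [if_pos h]
      have hlt' : n < 2 * p * 2 ^ fuel := by
        have : p * 2 ^ (fuel + 1) = 2 * p * 2 ^ fuel := by ring
        rw [this] at hlt
        exact hlt
      obtain ⟨h1, h2, e, he⟩ := ih n (2 * p) (by omega) h hlt'
      exact ⟨h1, h2, e + 1, by rw [he]; ring⟩
    · rw [if_neg h]
      exact ⟨hpn, by omega, 0, by ring⟩

lemma msb_pow_spec (n : Int) (h : 1 ≤ n) :
    msb_pow n ≤ n ∧ n < 2 * msb_pow n ∧ ∃ e : Nat, msb_pow n = (2 : Int) ^ e := by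
  have hpow : n < 1 * 2 ^ n.toNat := by
    have h1 : n.toNat < 2 ^ n.toNat := Nat.lt_two_pow_self
    have : ((n.toNat : Nat) : Int) < ((2 ^ n.toNat : Nat) : Int) := by exact_mod_cast h1
    push_cast at this
    omega
  obtain ⟨h1, h2, e, he⟩ := msbLoop_spec n.toNat n 1 (by omega) (by omega) hpow
  exact ⟨h1, h2, e, by rw [msb_pow, he]; ring⟩

lemma pow_unique (i j : Nat) (n : Int) (h1 : (2:Int)^i ≤ n) (h2 : n < 2 * 2^i)
    (h3 : (2:Int)^j ≤ n) (h4 : n < 2 * 2^j) : (2:Int)^i = (2:Int)^j := by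
  have key : ∀ a b : Nat, (2:Int)^a ≤ n → n < 2 * 2^b → a ≤ b := by
    intro a b ha hb
    by_contra hc
    push_neg at hc
    have : (2:Int) * 2 ^ b ≤ 2 ^ a := by
      calc (2:Int) * 2 ^ b = 2 ^ (b + 1) := by ring
      _ ≤ 2 ^ a := pow_le_pow_right₀ (by norm_num) (by omega)
    omega
  have := key i j h1 h4
  have := key j i h3 h2
  have : i = j := by omega
  rw [this]

lemma zeroA_eq_msb (n : Int) (h : 1 ≤ n) : zeroA n = msb_pow n := by
  obtain ⟨⟨a, ha⟩, h1, h2⟩ := zeroA_spec n h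
  obtain ⟨h3, h4, e, he⟩ := msb_pow_spec n h
  rw [ha, he]
  exact pow_unique a e n (ha ▸ h1) (ha ▸ h2) (he ▸ h3) (he ▸ h4)

lemma isZeroA_iff_msb (n : Int) (h : 1 ≤ n) : isZeroA n = true ↔ msb_pow n = n := by
  obtain ⟨h3, h4, e, he⟩ := msb_pow_spec n h
  rw [isZeroA_iff n h]
  constructor
  · rintro ⟨k, hk⟩
    have hu : (2:Int)^e = (2:Int)^k :=
      pow_unique e k n (he ▸ h3) (he ▸ h4) (by omega) (by omega)
    rw [he, hu, ← hk]
  · intro hmn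
    exact ⟨e, by rw [← hmn, he]⟩

lemma zeroA_lt (n : Int) (h : 1 ≤ n) (hz : isZeroA n = false) : 1 ≤ zeroA n ∧ zeroA n < n := by
  obtain ⟨⟨a, ha⟩, h1, h2⟩ := zeroA_spec n h
  have hpos : (0:Int) < 2 ^ a := by positivity
  have hne : zeroA n ≠ n := by
    intro he
    have : msb_pow n = n := by rw [← zeroA_eq_msb n h, he]
    have := (isZeroA_iff_msb n h).mpr this
    rw [hz] at this
    exact absurd this (by simp)
  constructor
  · omega
  · omega

lemma fA_irrel : ∀ (f1 f2 : Nat) (x y : Int), 0 ≤ y → (x - y).toNat < f1 → (x - y).toNat < f2 →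
    fA f1 x y = fA f2 x y := by
  intro f1
  induction f1 with
  | zero => intro f2 x y _ h1 _; omega
  | succ g ih =>
    intro f2 x y hy h1 h2
    obtain ⟨h, rfl⟩ : ∃ h, f2 = h + 1 := ⟨f2 - 1, by omega⟩
    show (if x = y then (1:Int) else _) = (if x = y then (1:Int) else _)
    by_cases hxy : x = y
    · rw [if_pos hxy, if_pos hxy]
    · rw [if_neg hxy, if_neg hxy]
      by_cases hlt : x < y
      · rw [if_pos hlt, if_pos hlt]
      · rw [if_neg hlt, if_neg hlt]
        have hx1 : 1 ≤ x := by omega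
        by_cases hz : isZeroA x
        · rw [if_pos hz, if_pos hz]
          exact ih h (x - 1) y hy (by omega) (by omega)
        · rw [if_neg hz, if_neg hz]
          obtain ⟨hz1, hz2⟩ := zeroA_lt x hx1 (by simpa using hz)
          rw [ih h (zeroA x) y hy (by omega) (by omega), ih h (x - 1) y hy (by omega) (by omega)]

lemma Fv_lt (n y : Int) (h : n < y) : Fv n y = 0 := by
  show (if n = y then (1:Int) else if n < y then 0 else _) = 0
  rw [if_neg (by omega), if_pos h]

lemma Fv_self (y : Int) : Fv y y = 1 := by
  show (if y = y then (1:Int) else _) = 1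
  rw [if_pos rfl]

lemma Fv_rec (n y : Int) (hy : 0 ≤ y) (hx : y < n) :
    Fv n y = (if isZeroA n then Fv (n-1) y else Fv (zeroA n) y + Fv (n-1) y) := by
  have hx1 : 1 ≤ n := by omega
  have hk : 1 ≤ (n - y).toNat := by omega
  have hstep : Fv n y = (if n = y then (1:Int) else if n < y then 0
      else if isZeroA n then fA ((n - y).toNat) (n - 1) y
      else fA ((n - y).toNat) (zeroA n) y + fA ((n - y).toNat) (n - 1) y) := rfl
  rw [hstep, if_neg (by omega), if_neg (by omega)]
  by_cases hz : isZeroA n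
  · rw [if_pos hz, if_pos hz]
    rw [fA_irrel ((n - y).toNat) ((n - 1 - y).toNat + 1) (n - 1) y hy (by omega) (by omega)]
    rfl
  · rw [if_neg hz, if_neg hz]
    obtain ⟨hz1, hz2⟩ := zeroA_lt n hx1 (by simpa using hz)
    rw [fA_irrel ((n - y).toNat) ((zeroA n - y).toNat + 1) (zeroA n) y hy (by omega) (by omega),
        fA_irrel ((n - y).toNat) ((n - 1 - y).toNat + 1) (n - 1) y hy (by omega) (by omega)]
    rfl

lemma Binv : ∀ (j : Nat) (y : Int), 0 ≤ y → ∀ k : Int,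
    ((PySem.List.pyRange (y+1) (y+1+(j:Int)) 1).foldl stepB ((PySem.Dict.empty).insert y 1)).get? k
      = if y ≤ k ∧ k ≤ y + (j:Int) then some (Fv k y) else none := by
  intro j
  induction j with
  | zero =>
    intro y hy k
    rw [show ((0:Nat):Int) = 0 from rfl, add_zero,
        PySem.List.pyRange_one_eq_nil (by omega)]
    simp only [List.foldl_nil]
    rw [PySem.Dict.get?_insert]
    by_cases hk : k = y
    · rw [if_pos hk, if_pos (by omega)]
      rw [hk, Fv_self]
    · rw [if_neg hk, if_neg (by omega), PySem.Dict.get?_empty]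
  | succ j ih =>
    intro y hy k
    have hc : (((j+1):Nat):Int) = (j:Int) + 1 := by push_cast; ring
    have hsplit : PySem.List.pyRange (y+1) (y+1+(((j+1):Nat):Int)) 1
        = PySem.List.pyRange (y+1) (y+1+(j:Int)) 1 ++ [y+1+(j:Int)] := by
      rw [hc, show y+1+((j:Int)+1) = (y+1+(j:Int))+1 from by ring]
      exact PySem.List.pyRange_one_succ_right (by omega)
    rw [hsplit, List.foldl_append]
    set n := y + 1 + (j:Int) with hn
    simp only [List.foldl_cons, List.foldl_nil]
    have h1n : 1 ≤ n := by omega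
    set g := (PySem.List.pyRange (y+1) (y+1+(j:Int)) 1).foldl stepB ((PySem.Dict.empty).insert y 1) with hg
    have hgD : ∀ m : Int, g.getD m 0 = if y ≤ m ∧ m ≤ y + (j:Int) then Fv m y else 0 := by
      intro m
      rw [PySem.Dict.getD_eq_get?_getD, ih y hy m]
      split_ifs <;> rfl
    have hstep : stepB g n = g.insert n (if 1 ≤ n then
        (if msb_pow n ≠ n then g.getD (n-1) 0 + g.getD (msb_pow n) 0 else g.getD (n-1) 0)
        else g.getD (n-1) 0) := rfl
    rw [hstep, PySem.Dict.get?_insert]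
    by_cases hk : k = n
    · subst hk
      rw [if_pos rfl, if_pos h1n,
          if_pos (show y ≤ n ∧ n ≤ y + (((j+1):Nat):Int) from by constructor <;> omega)]
      congr 1
      by_cases hz : isZeroA n
      · have hmsb : msb_pow n = n := (isZeroA_iff_msb n h1n).mp hz
        rw [if_neg (by simp [hmsb])]
        rw [hgD (n-1), if_pos (by omega)]
        rw [Fv_rec n y hy (by omega), if_pos hz]
      · have hz' : isZeroA n = false := by simpa using hz
        have hmsb : msb_pow n ≠ n := by
          intro he
          have := (isZeroA_iff_msb n h1n).mpr he
          rw [hz'] at this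
          exact absurd this (by simp)
        rw [if_pos hmsb]
        obtain ⟨hz1, hz2⟩ := zeroA_lt n h1n hz'
        have hzm : zeroA n = msb_pow n := zeroA_eq_msb n h1n
        rw [hgD (n-1), if_pos (by omega), ← hzm, hgD (zeroA n)]
        rw [Fv_rec n y hy (by omega), if_neg hz]
        by_cases hyp : y ≤ zeroA n
        · rw [if_pos (show y ≤ zeroA n ∧ zeroA n ≤ y + (j:Int) from ⟨hyp, by omega⟩)]
          ring
        · rw [if_neg (show ¬ (y ≤ zeroA n ∧ zeroA n ≤ y + (j:Int)) from fun hco => hyp hco.1),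
              Fv_lt (zeroA n) y (by omega)]
          ring
    · rw [if_neg hk, ih y hy k]
      have heq : (y ≤ k ∧ k ≤ y + (j:Int)) ↔ (y ≤ k ∧ k ≤ y + (((j+1):Nat):Int)) := by
        rw [hc]
        constructor
        · rintro ⟨a, b⟩; exact ⟨a, by omega⟩
        · rintro ⟨a, b⟩; exact ⟨a, by omega⟩
      rw [if_congr heq rfl rfl]

-- ===== VERDICT (by name: the statement is the Claim_ definition above) =====
theorem f_3717_spec : Claim_equal_f_3717 := by
  unfold Claim_equal_f_3717
  intro x y hdom hpre
  unfold Spec_f_3717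
  by_cases hlt : x < y
  · have h0 : (x - y).toNat = 0 := by omega
    show fA ((x - y).toNat + 1) x y = f_3717_alt x y
    rw [h0]
    have hA : fA 1 x y = 0 := by
      show (if x = y then (1:Int) else if x < y then 0 else _) = 0
      rw [if_neg (by omega), if_pos hlt]
    rw [hA]
    unfold f_3717_alt
    rw [if_pos hlt]
  · by_cases hy : 0 ≤ y
    · have hB : f_3717_alt x y = Fv x y := by
        simp only [f_3717_alt, if_neg hlt]
        rw [show x + 1 = y + 1 + (((x - y).toNat : Nat) : Int) from by omega]
        rw [PySem.Dict.getD_eq_get?_getD, Binv ((x - y).toNat) y hy x,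
            if_pos (by constructor <;> omega)]
        rfl
      rw [hB]
      rfl
    · have hxy : x = y := by rcases hpre with h | h <;> omega
      subst hxy
      have hA : f_3717 x x = 1 := by
        show (if x = x then (1:Int) else _) = 1
        rw [if_pos rfl]
      rw [hA]
      simp only [f_3717_alt, if_neg (by omega : ¬ x < x)]
      rw [PySem.List.pyRange_one_eq_nil (by omega)]
      simp only [List.foldl_nil]
      rw [PySem.Dict.getD_eq_get?_getD, PySem.Dict.get?_insert, if_pos rfl]
      rfl
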